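-- pv_equiv track=rewrite | github.com/NekaU/quoridor_game | walls.py | check_if_it_wall
-- ===== SOURCE A (Python) =====
-- def check_if_it_wall(start_wall, end_wall):
--     if start_wall[0] == end_wall[0]:
--         if start_wall[1] > end_wall[1]:
--             return True if len([num for num in range(end_wall[1]+1, start_wall[1])]) == 1 else False
--         else:
--             return True if len([num for num in range(start_wall[1]+1, end_wall[1])]) == 1 else False
--     elif start_wall[1] == end_wall[1]:
--         if start_wall[0] > end_wall[0]:
--             return True if len([num for num in range(end_wall[0]+1, start_wall[0])]) == 1 else False
--         else:
--             return True if len([num for num in range(start_wall[0]+1, end_wall[0])]) == 1 else False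
--     else:
--         return False
-- ===== SOURCE B (Python) =====
-- def check_if_it_wall(start_wall, end_wall):
--     return (start_wall[0] == end_wall[0] and abs(start_wall[1] - end_wall[1]) == 2) or \
--            (start_wall[1] == end_wall[1] and abs(start_wall[0] - end_wall[0]) == 2)
-- ===== Notes on version B (the rewrite author's own statement) =====
-- stated objective: simpler
-- what changed: Replaces A's four oriented range-list constructions and length checks with one O(1) arithmetic predicate: same row or column and absolute coordinate difference exactly 2.
import Mathlib
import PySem

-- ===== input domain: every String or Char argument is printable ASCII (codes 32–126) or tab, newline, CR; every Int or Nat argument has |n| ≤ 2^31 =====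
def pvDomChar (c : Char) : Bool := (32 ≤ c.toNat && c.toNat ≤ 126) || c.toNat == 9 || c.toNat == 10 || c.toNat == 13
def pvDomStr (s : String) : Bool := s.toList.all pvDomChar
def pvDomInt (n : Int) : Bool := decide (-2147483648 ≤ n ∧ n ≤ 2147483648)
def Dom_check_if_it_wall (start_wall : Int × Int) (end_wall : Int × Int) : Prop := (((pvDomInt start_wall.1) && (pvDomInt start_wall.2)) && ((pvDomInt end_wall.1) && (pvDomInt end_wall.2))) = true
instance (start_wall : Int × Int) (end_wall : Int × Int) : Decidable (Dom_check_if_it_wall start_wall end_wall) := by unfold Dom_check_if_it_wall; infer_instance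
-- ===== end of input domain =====

-- B replaces A's four oriented range-list length checks with one O(1) arithmetic predicate (simpler).


-- ===== PORT A =====
def check_if_it_wall (start_wall : Int × Int) (end_wall : Int × Int) : Bool :=
  if start_wall.1 == end_wall.1 then
    if start_wall.2 > end_wall.2 then
      if (PySem.List.pyRange (end_wall.2 + 1) start_wall.2 1).length == 1 then true else false
    else
      if (PySem.List.pyRange (start_wall.2 + 1) end_wall.2 1).length == 1 then true else false
  else if start_wall.2 == end_wall.2 then
    if start_wall.1 > end_wall.1 then
      if (PySem.List.pyRange (end_wall.1 + 1) start_wall.1 1).length == 1 then true else false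
    else
      if (PySem.List.pyRange (start_wall.1 + 1) end_wall.1 1).length == 1 then true else false
  else
    false

-- ===== PORT B =====
def check_if_it_wall_alt (start_wall : Int × Int) (end_wall : Int × Int) : Bool :=
  (start_wall.1 == end_wall.1 && (start_wall.2 - end_wall.2).natAbs == 2) ||
  (start_wall.2 == end_wall.2 && (start_wall.1 - end_wall.1).natAbs == 2)

-- ===== PRECONDITION & SPEC =====
def Spec_check_if_it_wall (start_wall : Int × Int) (end_wall : Int × Int) (out : Bool) : Prop := out = check_if_it_wall_alt start_wall end_wall
instance (start_wall : Int × Int) (end_wall : Int × Int) (out : Bool) : Decidable (Spec_check_if_it_wall start_wall end_wall out) := by unfold Spec_check_if_it_wall; infer_instance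

-- ===== CLAIM (what is proved, stated in full; the proofs are below) =====
def Claim_equal_check_if_it_wall : Prop := ∀ (start_wall : Int × Int) (end_wall : Int × Int), Dom_check_if_it_wall start_wall end_wall → Spec_check_if_it_wall start_wall end_wall (check_if_it_wall start_wall end_wall)

-- ===== LEMMAS AND PROOFS =====
theorem check_if_it_wall_eq (s e : Int × Int) :
    check_if_it_wall s e = check_if_it_wall_alt s e := by
  unfold check_if_it_wall check_if_it_wall_alt
  simp only [PySem.List.length_pyRange_one, beq_iff_eq]
  split_ifs with h1 h2 h3 h4 h5 h6 h7 h8 <;>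
    simp_all <;> omega

-- ===== VERDICT (by name: the statement is the Claim_ definition above) =====
theorem check_if_it_wall_spec : Claim_equal_check_if_it_wall := by
  intro s e _
  unfold Spec_check_if_it_wall
  exact check_if_it_wall_eq s e
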